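-- pv_equiv track=rewrite | github.com/npalgit/project_mountain_view | bits/singleNumK.py | sn4
-- ===== SOURCE A (Python) =====
-- def sn4(nums):
--     """
--     every element appears four times. One appears 1, 2, 3 times. or not multiple of 4
--     """
--     a = 0
--     b = 0
--     for c in nums:
--         ta = (a&~b&~c)|(a&b&~c)|(~a&b&c)|(a&~b&c)
--         b = (~a&b&~c)|(a&b&~c)|(~a&~b&c)|(a&~b&c)
--         a = ta
--     # view a and b each corresponding bit as counter.
--     # ab, represents how many bit 1's are there.
--     # if there are 1 (0b01), 2 (0b10), 3 (0b11)  bits,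
--     # the result's corresponding bit
--     # will be a 1
--     return a | b
-- ===== SOURCE B (Python) =====
-- def sn4(nums):
--     # Per-bit counting: for each bit position, count how many inputs have
--     # that bit set; the result has a bit wherever that count mod 4 != 0.
--     # Bits at positions >= m equal each number's sign bit, so the high part
--     # of the result is all-ones iff the number of negatives mod 4 != 0.
--     m = 0
--     for n in nums:
--         m = max(m, n.bit_length())
--     neg = 0
--     for n in nums:
--         if n < 0:
--             neg += 1
--     res = 0
--     for i in range(m):
--         cnt = 0
--         for n in nums:
--             if (n >> i) & 1:
--                 cnt += 1
--         if cnt % 4 != 0: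
--             res |= 1 << i
--     if neg % 4 != 0:
--         res |= -1 << m  # sign-extend: all bits above m set
--     return res
-- ===== Notes on version B (the rewrite author's own statement) =====
-- stated objective: alternative
-- what changed: Replaces the two-bitmask mod-4 state machine over the whole list with a per-bit-position count table: for each bit index up to the maximum bit_length it counts set bits mod 4 and reconstructs the result bit by bit, sign-extending when the number of negatives mod 4 is nonzero.
import Mathlib
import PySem

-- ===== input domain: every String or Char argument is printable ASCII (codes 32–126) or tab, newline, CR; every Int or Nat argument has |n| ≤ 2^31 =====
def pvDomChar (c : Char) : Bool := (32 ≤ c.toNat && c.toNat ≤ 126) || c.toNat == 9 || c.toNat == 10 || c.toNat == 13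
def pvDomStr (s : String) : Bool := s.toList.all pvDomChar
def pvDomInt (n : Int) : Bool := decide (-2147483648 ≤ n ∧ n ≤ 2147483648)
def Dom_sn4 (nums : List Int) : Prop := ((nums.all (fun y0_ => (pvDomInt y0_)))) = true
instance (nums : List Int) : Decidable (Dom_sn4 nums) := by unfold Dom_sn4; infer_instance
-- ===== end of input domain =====

-- B replaces A's two-bitmask mod-4 state machine with a per-bit-position count
-- table (count set bits at each position mod 4, then rebuild the integer,
-- sign-extending when the number of negatives mod 4 is nonzero); alternative
-- formulation, no speed claim.

-- ===== PORT A =====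
-- Python's &, |, ~ on arbitrary ints are exactly Int.land / Int.lor / Int.lnot
-- (two's complement with infinite sign extension).
def sn4Step (s : Int × Int) (c : Int) : Int × Int :=
  (Int.lor (Int.lor (Int.lor
      (Int.land (Int.land s.1 (Int.lnot s.2)) (Int.lnot c))
      (Int.land (Int.land s.1 s.2) (Int.lnot c)))
      (Int.land (Int.land (Int.lnot s.1) s.2) c))
      (Int.land (Int.land s.1 (Int.lnot s.2)) c),
   Int.lor (Int.lor (Int.lor
      (Int.land (Int.land (Int.lnot s.1) s.2) (Int.lnot c))
      (Int.land (Int.land s.1 s.2) (Int.lnot c)))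
      (Int.land (Int.land (Int.lnot s.1) (Int.lnot s.2)) c))
      (Int.land (Int.land s.1 (Int.lnot s.2)) c))

def sn4 (nums : List Int) : Int :=
  let p := nums.foldl sn4Step (0, 0)
  Int.lor p.1 p.2

-- ===== PORT B =====
-- Python n.bit_length() = number of bits of |n|
def pyBitLength (n : Int) : Nat := n.natAbs.size

-- m = 0; for n in nums: m = max(m, n.bit_length())
def altM (nums : List Int) : Nat := nums.foldl (fun acc n => max acc (pyBitLength n)) 0

-- neg = 0; for n in nums: if n < 0: neg += 1
def altNeg (nums : List Int) : Nat := nums.foldl (fun acc n => if n < 0 then acc + 1 else acc) 0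

-- cnt = 0; for n in nums: if (n >> i) & 1: cnt += 1   ((n >> i) & 1 ≠ 0 ↔ n.testBit i)
def altCnt (nums : List Int) (i : Nat) : Nat :=
  nums.foldl (fun c n => if n.testBit i then c + 1 else c) 0

-- res = 0; for i in range(m): if cnt % 4 != 0: res |= 1 << i   (1 << i = 2^i)
def altRes (nums : List Int) (m : Nat) : Int :=
  (List.range m).foldl
    (fun res i => if altCnt nums i % 4 ≠ 0 then Int.lor res ((2 : Int) ^ i) else res) 0

def sn4_alt (nums : List Int) : Int :=
  -- if neg % 4 != 0: res |= -1 << m   (-1 << m = -(2^m))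
  if altNeg nums % 4 ≠ 0 then Int.lor (altRes nums (altM nums)) (-((2 : Int) ^ altM nums))
  else altRes nums (altM nums)

-- ===== PRECONDITION & SPEC =====
def Spec_sn4 (nums : List Int) (out : Int) : Prop := out = sn4_alt nums
instance (nums : List Int) (out : Int) : Decidable (Spec_sn4 nums out) := by unfold Spec_sn4; infer_instance

-- ===== CLAIM (what is proved, stated in full; the proofs are below) =====
def Claim_equal_sn4 : Prop := ∀ (nums : List Int), Dom_sn4 nums → Spec_sn4 nums (sn4 nums)

-- ===== LEMMAS AND PROOFS =====

-- number of elements of nums with bit i set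
def cntL (nums : List Int) (i : Nat) : Nat := nums.countP (fun n => n.testBit i)

theorem testBit_coe (n i : Nat) : ((n : Int)).testBit i = n.testBit i := rfl

theorem int_testBit_ext (a b : Int) (h : ∀ i, a.testBit i = b.testBit i) : a = b := by
  have hb : ∀ (m : Nat) (i : Nat), Nat.size m ≤ i → Nat.testBit m i = false := by
    intro m i hi
    exact Nat.testBit_eq_false_of_lt
      (lt_of_lt_of_le (Nat.lt_size_self m) (Nat.pow_le_pow_right (by norm_num) hi))
  cases a with
  | ofNat m =>
    cases b with
    | ofNat n =>
      have : m = n := Nat.eq_of_testBit_eq (fun i => by simpa [Int.testBit] using h i)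
      simp [this]
    | negSucc n =>
      exfalso
      have hi := h (max (Nat.size m) (Nat.size n))
      rw [show (Int.ofNat m).testBit _ = Nat.testBit m _ from rfl,
          show (Int.negSucc n).testBit _ = !Nat.testBit n _ from rfl,
          hb m _ (le_max_left _ _), hb n _ (le_max_right _ _)] at hi
      simp at hi
  | negSucc m =>
    cases b with
    | ofNat n =>
      exfalso
      have hi := h (max (Nat.size m) (Nat.size n))
      rw [show (Int.negSucc m).testBit _ = !Nat.testBit m _ from rfl,
          show (Int.ofNat n).testBit _ = Nat.testBit n _ from rfl,
          hb m _ (le_max_left _ _), hb n _ (le_max_right _ _)] at hi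
      simp at hi
    | negSucc n =>
      have : m = n := Nat.eq_of_testBit_eq (fun i => by
        have := h i
        rw [show (Int.negSucc m).testBit i = !Nat.testBit m i from rfl,
            show (Int.negSucc n).testBit i = !Nat.testBit n i from rfl] at this
        simpa using this)
      simp [this]

theorem step_val (a b c : Int) (i : Nat) :
    2 * ((sn4Step (a, b) c).1.testBit i).toNat + ((sn4Step (a, b) c).2.testBit i).toNat
      = (2 * (a.testBit i).toNat + (b.testBit i).toNat + (c.testBit i).toNat) % 4 := by
  simp only [sn4Step, Int.testBit_lor, Int.testBit_land, Int.testBit_lnot]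
  cases a.testBit i <;> cases b.testBit i <;> cases c.testBit i <;> rfl

theorem loopA (l : List Int) (a b : Int) (i : Nat) :
    2 * ((l.foldl sn4Step (a, b)).1.testBit i).toNat + ((l.foldl sn4Step (a, b)).2.testBit i).toNat
      = (2 * (a.testBit i).toNat + (b.testBit i).toNat + cntL l i) % 4 := by
  induction l generalizing a b with
  | nil =>
    simp only [List.foldl_nil, cntL, List.countP_nil]
    cases a.testBit i <;> cases b.testBit i <;> rfl
  | cons c l ih =>
    rw [List.foldl_cons]
    have hstep := step_val a b c i
    rcases hp : sn4Step (a, b) c with ⟨x, y⟩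
    rw [hp] at hstep
    dsimp only at hstep
    have hc : cntL (c :: l) i = cntL l i + (c.testBit i).toNat := by
      cases hcb : c.testBit i <;> simp [cntL, hcb]
    rw [ih x y, hc]
    omega

theorem zero_testBit_int (i : Nat) : (0 : Int).testBit i = false := by
  simp [Int.testBit]

theorem sn4_bit (nums : List Int) (i : Nat) :
    (sn4 nums).testBit i = decide (cntL nums i % 4 ≠ 0) := by
  have h := loopA nums 0 0 i
  rw [zero_testBit_int] at h
  simp only [Bool.toNat_false, Nat.mul_zero, Nat.zero_add] at h
  unfold sn4
  rw [Int.testBit_lor]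
  cases hx : (nums.foldl sn4Step (0, 0)).1.testBit i <;>
    cases hy : (nums.foldl sn4Step (0, 0)).2.testBit i <;>
      rw [hx, hy] at h <;> simp at h ⊢ <;> omega

theorem foldl_cnt (l : List Int) (i k : Nat) :
    l.foldl (fun c n => if n.testBit i then c + 1 else c) k = k + cntL l i := by
  induction l generalizing k with
  | nil => simp [cntL]
  | cons c l ih =>
    rw [List.foldl_cons, ih]
    have hc : cntL (c :: l) i = cntL l i + if c.testBit i then 1 else 0 := by
      simp [cntL, List.countP_cons]
    rw [hc]
    cases c.testBit i <;> simp <;> omega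

theorem altCnt_eq (nums : List Int) (i : Nat) : altCnt nums i = cntL nums i := by
  unfold altCnt; rw [foldl_cnt]; omega

theorem altNeg_eq (nums : List Int) :
    altNeg nums = nums.countP (fun n => decide (n < 0)) := by
  have : ∀ (l : List Int) (k : Nat),
      l.foldl (fun acc n => if n < 0 then acc + 1 else acc) k
        = k + l.countP (fun n => decide (n < 0)) := by
    intro l
    induction l with
    | nil => simp
    | cons c l ih =>
      intro k
      rw [List.foldl_cons, ih, List.countP_cons]
      by_cases hc : c < 0 <;> simp [hc] <;> omega
  simpa using this nums 0

theorem le_foldl_max (l : List Int) (acc : Nat) :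
    acc ≤ l.foldl (fun a x => max a (pyBitLength x)) acc := by
  induction l generalizing acc with
  | nil => simp
  | cons c l ih => exact le_trans (le_max_left _ _) (ih _)

theorem foldl_max_mem (l : List Int) (acc : Nat) (n : Int) (hn : n ∈ l) :
    pyBitLength n ≤ l.foldl (fun a x => max a (pyBitLength x)) acc := by
  induction l generalizing acc with
  | nil => cases hn
  | cons c l ih =>
    rw [List.foldl_cons]
    rcases List.mem_cons.mp hn with h | h
    · subst h; exact le_trans (le_max_right _ _) (le_foldl_max _ _)
    · exact ih _ h

theorem testBit_of_bitLength_le (n : Int) (i : Nat) (h : pyBitLength n ≤ i) :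
    n.testBit i = decide (n < 0) := by
  have hb : ∀ (m : Nat), Nat.size m ≤ i → Nat.testBit m i = false := by
    intro m hi
    exact Nat.testBit_eq_false_of_lt
      (lt_of_lt_of_le (Nat.lt_size_self m) (Nat.pow_le_pow_right (by norm_num) hi))
  cases n with
  | ofNat m =>
    rw [show (Int.ofNat m).testBit i = Nat.testBit m i from rfl, hb m h]
    symm
    rw [decide_eq_false_iff_not, Int.ofNat_eq_natCast]
    omega
  | negSucc m =>
    have hm : Nat.size m ≤ i :=
      le_trans (Nat.size_le_size (Nat.le_succ m))
        (by simpa [pyBitLength, Int.natAbs_negSucc] using h)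
    rw [show (Int.negSucc m).testBit i = !Nat.testBit m i from rfl, hb m hm]
    simp [Int.negSucc_lt_zero]

theorem cnt_high (nums : List Int) (i : Nat) (h : ∀ n ∈ nums, pyBitLength n ≤ i) :
    cntL nums i = nums.countP (fun n => decide (n < 0)) := by
  unfold cntL
  induction nums with
  | nil => simp
  | cons c l ih =>
    rw [List.countP_cons, List.countP_cons,
        ih (fun n hn => h n (List.mem_cons_of_mem _ hn)),
        testBit_of_bitLength_le c i (h c List.mem_cons_self)]

theorem testBit_two_pow_int (m i : Nat) : ((2 : Int) ^ m).testBit i = decide (m = i) := by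
  have : (2 : Int) ^ m = ((2 ^ m : Nat) : Int) := by push_cast; ring
  rw [this, testBit_coe, Nat.testBit_two_pow]

theorem testBit_neg_two_pow (m i : Nat) :
    (-((2 : Int) ^ m)).testBit i = !decide (i < m) := by
  have h1 : (1 : Nat) ≤ 2 ^ m := Nat.one_le_two_pow
  have h3 : ((2 ^ m - 1 : Nat) : Int) = (2 : Int) ^ m - 1 := by push_cast [h1]; ring
  have h2 : -((2 : Int) ^ m) = Int.negSucc (2 ^ m - 1) := by
    rw [Int.negSucc_eq, h3]; ring
  rw [h2, show (Int.negSucc (2 ^ m - 1)).testBit i = !Nat.testBit (2 ^ m - 1) i from rfl,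
      Nat.testBit_two_pow_sub_one]

theorem altRes_bit (nums : List Int) (m k : Nat) :
    (altRes nums m).testBit k = (decide (k < m) && decide (cntL nums k % 4 ≠ 0)) := by
  induction m with
  | zero => simp [altRes, zero_testBit_int]
  | succ m ih =>
    rw [altRes, List.range_succ, List.foldl_append, List.foldl_cons, List.foldl_nil]
    rw [show (List.range m).foldl
        (fun res i => if altCnt nums i % 4 ≠ 0 then Int.lor res ((2 : Int) ^ i) else res) 0
        = altRes nums m from rfl]
    by_cases hc : altCnt nums m % 4 ≠ 0
    · rw [if_pos hc, Int.testBit_lor, ih, testBit_two_pow_int]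
      rw [altCnt_eq] at hc
      rcases Nat.lt_trichotomy k m with hlt | heq | hgt
      · have h1 : k < m + 1 := by omega
        have h2 : ¬ (m = k) := by omega
        simp [hlt, h1, h2]
      · subst heq
        simp [hc]
      · have h1 : ¬ (k < m) := by omega
        have h2 : ¬ (k < m + 1) := by omega
        have h3 : ¬ (m = k) := by omega
        simp [h1, h2, h3]
    · rw [if_neg hc, ih]
      rw [altCnt_eq] at hc
      have h0 : cntL nums m % 4 = 0 := by omega
      rcases Nat.lt_trichotomy k m with hlt | heq | hgt
      · have h1 : k < m + 1 := by omega
        simp [hlt, h1]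
      · subst heq
        simp [h0]
      · have h1 : ¬ (k < m) := by omega
        have h2 : ¬ (k < m + 1) := by omega
        simp [h1, h2]

theorem sn4_alt_bit (nums : List Int) (k : Nat) :
    (sn4_alt nums).testBit k = decide (cntL nums k % 4 ≠ 0) := by
  unfold sn4_alt
  have hhigh : ∀ i, altM nums ≤ i →
      cntL nums i = nums.countP (fun n => decide (n < 0)) := by
    intro i hi
    exact cnt_high nums i (fun n hn => le_trans (foldl_max_mem nums 0 n hn) hi)
  by_cases hneg : altNeg nums % 4 ≠ 0
  · rw [if_pos hneg, Int.testBit_lor, altRes_bit, testBit_neg_two_pow]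
    by_cases hk : k < altM nums
    · simp [hk]
    · have hc := hhigh k (by omega)
      rw [altNeg_eq] at hneg
      simp [hk, hc, hneg]
  · rw [if_neg hneg, altRes_bit]
    by_cases hk : k < altM nums
    · simp [hk]
    · have hc := hhigh k (by omega)
      rw [altNeg_eq] at hneg
      have h0 : nums.countP (fun n => decide (n < 0)) % 4 = 0 := by omega
      simp [hk, hc, h0]

-- ===== VERDICT (by name: the statement is the Claim_ definition above) =====
theorem sn4_spec : Claim_equal_sn4 := by
  intro nums _
  unfold Spec_sn4
  exact int_testBit_ext _ _ (fun i => by rw [sn4_bit, sn4_alt_bit])
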